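-- pv_equiv track=rewrite | github.com/a625687551/Leetcode | TargetOffer/61、扑克牌顺子.py | is_continue
-- ===== SOURCE A (Python) =====
-- def is_continue(numbers):
--     if not numbers or len(numbers) != 5:
--         return False
--     min_num, max_num = 14, -1
--     for i, v in enumerate(numbers):
--         if v < 0 or v > 13:
--             return False
--         if v == 0:
--             continue
--         if i > 0 and numbers[i] == numbers[i - 1]:
--             return False
--         max_num = v if v > max_num else max_num
--         min_num = v if v < min_num else min_num
--         if max_num - min_num >= 5:
--             return False
--     return True
-- ===== SOURCE B (Python) =====
-- def is_continue(numbers):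
--     if len(numbers) != 5:
--         return False
--     if any(v < 0 or v > 13 for v in numbers):
--         return False
--     cards = {v for v in numbers if v != 0}
--     zeros = numbers.count(0)
--     if len(cards) + zeros != 5:
--         return False
--     return not cards or max(cards) - min(cards) <= 4
-- ===== Notes on version B (the rewrite author's own statement) =====
-- stated objective: alternative
-- what changed: Replaces A's single fused loop (running min/max, early exits, positional previous-element comparison) by a set-based algorithm: build the set of nonzero cards, detect ANY duplicate nonzero card by comparing set size plus joker count against 5, then one span check with builtin max()/min() on the set.
-- intended difference: On 5-card hands with all values in 0..13 whose duplicated nonzero cards are never adjacent and whose nonzero span is below 5 (e.g. [1,2,1,0,0]), A returns True although a duplicated non-joker card makes a straight impossible; B's set-based duplicate test returns False, the intended answer. — e.g. on is_continue([1, 2, 1, 0, 0]): A returns true, B returns false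
import Mathlib
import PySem

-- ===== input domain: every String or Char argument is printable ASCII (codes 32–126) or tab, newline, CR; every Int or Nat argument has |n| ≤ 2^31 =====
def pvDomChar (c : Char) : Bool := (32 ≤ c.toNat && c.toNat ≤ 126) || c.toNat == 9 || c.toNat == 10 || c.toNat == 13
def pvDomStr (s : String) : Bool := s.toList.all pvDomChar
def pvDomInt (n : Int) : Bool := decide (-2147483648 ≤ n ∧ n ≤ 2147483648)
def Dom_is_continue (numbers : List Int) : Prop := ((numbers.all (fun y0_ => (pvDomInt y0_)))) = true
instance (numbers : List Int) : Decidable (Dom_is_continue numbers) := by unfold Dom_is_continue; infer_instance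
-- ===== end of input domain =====

-- B replaces A's fused loop (running min/max, early exits, positional previous-element check)
-- by a set-based algorithm: set of nonzero cards, duplicate detection by set size + joker count,
-- one span check on the set; on hands with a non-adjacent duplicated nonzero card (D_ below)
-- B intentionally returns False where A returns True.


-- ===== PORT A =====
-- the for-loop of A: state = (previous element, running min, running max); early returns = false
def isContLoopA (l : List Int) (prev : Option Int) (minN maxN : Int) : Bool :=
  match l with
  | [] => true
  | v :: rest =>
    if v < 0 ∨ v > 13 then false
    else if v = 0 then isContLoopA rest (some v) minN maxN
    else if prev = some v then false
    else
      let maxN' := if v > maxN then v else maxN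
      let minN' := if v < minN then v else minN
      if maxN' - minN' ≥ 5 then false
      else isContLoopA rest (some v) minN' maxN'

def is_continue (numbers : List Int) : Bool :=
  if numbers = [] ∨ numbers.length ≠ 5 then false
  else isContLoopA numbers none 14 (-1)

-- ===== PORT B =====
def is_continue_alt (numbers : List Int) : Bool :=
  if numbers.length ≠ 5 then false
  else if numbers.any (fun v => decide (v < 0 ∨ v > 13)) then false
  else
    let cards := PySem.Set.ofList (numbers.filter (fun v => v ≠ 0))
    let zeros := PySem.List.count numbers 0
    if PySem.Set.len cards + (zeros : Int) ≠ 5 then false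
    else
      match PySem.List.max? cards (fun x => x), PySem.List.min? cards (fun x => x) with
      | some mx, some mn => decide (mx - mn ≤ 4)
      | _, _ => true

-- ===== PRECONDITION & SPEC =====
-- On 5-card hands with all values in 0..13 whose duplicated nonzero cards are never adjacent and
-- whose nonzero span is below 5 (e.g. [1,2,1,0,0]), A returns True although a duplicated non-joker
-- card makes a straight impossible; B's set-based duplicate test returns False, the intended answer.
def D_is_continue (numbers : List Int) : Prop :=
  numbers.length = 5 ∧ ¬(numbers.filter (· ≠ 0)).Nodup ∧
  numbers.IsChain (fun a b => b = a → b = 0) ∧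
  ∀ a ∈ numbers, ∀ b ∈ numbers, 0 ≤ a ∧ a ≤ 13 ∧ (a = 0 ∨ b = 0 ∨ a - b ≤ 4)

instance (numbers : List Int) : Decidable (D_is_continue numbers) := by
  unfold D_is_continue; infer_instance

def Spec_is_continue (numbers : List Int) (out : Bool) : Prop :=
  ¬ D_is_continue numbers → out = is_continue_alt numbers
instance (numbers : List Int) (out : Bool) : Decidable (Spec_is_continue numbers out) := by
  unfold Spec_is_continue; infer_instance

def pvDiffWitness_is_continue : List Int := [1, 2, 1, 0, 0]
def pvDiffWitnessOut_is_continue : Bool × Bool := (true, false)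

-- ===== CLAIM (what is proved, stated in full; the proofs are below) =====
def Claim_unchanged_is_continue : Prop :=
  ∀ (numbers : List Int), Dom_is_continue numbers → Spec_is_continue numbers (is_continue numbers)
def Claim_changed_is_continue : Prop :=
  Dom_is_continue (pvDiffWitness_is_continue) ∧ D_is_continue (pvDiffWitness_is_continue) ∧
  is_continue (pvDiffWitness_is_continue) = pvDiffWitnessOut_is_continue.1 ∧
  is_continue_alt (pvDiffWitness_is_continue) = pvDiffWitnessOut_is_continue.2 ∧
  pvDiffWitnessOut_is_continue.1 ≠ pvDiffWitnessOut_is_continue.2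
def Claim_exact_is_continue : Prop :=
  ∀ (numbers : List Int), Dom_is_continue numbers → D_is_continue numbers →
    is_continue numbers ≠ is_continue_alt numbers

-- ===== LEMMAS AND PROOFS =====

-- every card value is in Python's accepted range 0..13
def RangeOK (l : List Int) : Prop := ∀ v ∈ l, 0 ≤ v ∧ v ≤ 13

-- no nonzero element equals the element right before it (prev = element before the list)
def AdjOK : Option Int → List Int → Prop
  | _, [] => True
  | prev, v :: rest => (v ≠ 0 → prev ≠ some v) ∧ AdjOK (some v) rest

lemma foldl_min_le_forall (t : List Int) (s : Int) :
    t.foldl min s ≤ s ∧ ∀ y ∈ t, t.foldl min s ≤ y := by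
  induction t generalizing s with
  | nil => simp
  | cons x xs ih =>
    refine ⟨le_trans (ih (min s x)).1 (min_le_left s x), ?_⟩
    intro y hy
    rcases List.mem_cons.mp hy with rfl | hy
    · exact le_trans (ih (min s y)).1 (min_le_right s y)
    · exact (ih (min s x)).2 y hy

lemma foldl_max_mem (t : List Int) (s : Int) : t.foldl max s ∈ s :: t := by
  induction t generalizing s with
  | nil => simp
  | cons x xs ih =>
    simp only [List.foldl_cons]
    rcases List.mem_cons.mp (ih (max s x)) with h | h
    · rcases max_choice s x with hc | hc <;> rw [hc] at h ⊢ <;> simp [h]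
    · simp [h]

lemma foldl_min_mem (t : List Int) (s : Int) : t.foldl min s ∈ s :: t := by
  induction t generalizing s with
  | nil => simp
  | cons x xs ih =>
    simp only [List.foldl_cons]
    rcases List.mem_cons.mp (ih (min s x)) with h | h
    · rcases min_choice s x with hc | hc <;> rw [hc] at h ⊢ <;> simp [h]
    · simp [h]

lemma ite_max (a b : Int) : (if b > a then b else a) = max a b := by
  split_ifs <;> omega

lemma ite_min (a b : Int) : (if b < a then b else a) = min a b := by
  split_ifs <;> omega

-- characterization of A's loop, assuming the running check has held so far
lemma loopA_iff (l : List Int) (prev : Option Int) (mn mx : Int) (h : mx - mn < 5) :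
    isContLoopA l prev mn mx = true ↔
      RangeOK l ∧ AdjOK prev l ∧
      ((l.filter (fun v => v ≠ 0)).foldl max mx -
       (l.filter (fun v => v ≠ 0)).foldl min mn < 5) := by
  induction l generalizing prev mn mx with
  | nil => simpa [isContLoopA, RangeOK, AdjOK] using h
  | cons v rest ih =>
    by_cases h1 : v < 0 ∨ v > 13
    · simp only [isContLoopA, if_pos h1]
      constructor
      · intro hf; cases hf
      · rintro ⟨hr, -, -⟩
        have := hr v (List.mem_cons_self ..)
        omega
    · by_cases h2 : v = 0
      · subst h2
        simp only [isContLoopA, if_neg h1, if_true]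
        rw [ih (some 0) mn mx h]
        simp [RangeOK, AdjOK]
      · by_cases h3 : prev = some v
        · simp only [isContLoopA, if_neg h1, if_neg h2, if_pos h3]
          constructor
          · intro hf; cases hf
          · rintro ⟨-, ⟨hadj, -⟩, -⟩
            exact absurd h3 (hadj h2)
        · simp only [isContLoopA, if_neg h1, if_neg h2, if_neg h3]
          rw [ite_max, ite_min]
          have hfl : (v :: rest).filter (fun v => v ≠ 0) =
              v :: rest.filter (fun v => v ≠ 0) := by
            simp [h2]
          by_cases h4 : max mx v - min mn v ≥ 5
          · simp only [if_pos h4]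
            constructor
            · intro hf; cases hf
            · rintro ⟨-, -, hlt⟩
              rw [hfl] at hlt
              simp only [List.foldl_cons] at hlt
              have hmx := (PySem.List.le_foldl_max (rest.filter (fun v => v ≠ 0)) (max mx v)).1
              have hmn := (foldl_min_le_forall (rest.filter (fun v => v ≠ 0)) (min mn v)).1
              omega
          · simp only [if_neg h4]
            rw [ih (some v) (min mn v) (max mx v) (by omega)]
            rw [hfl]
            simp only [List.foldl_cons]
            constructor
            · rintro ⟨hr, hadj, hlt⟩
              exact ⟨fun w hw => by
                rcases List.mem_cons.mp hw with rfl | hw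
                · omega
                · exact hr w hw, ⟨fun _ => h3, hadj⟩, hlt⟩
            · rintro ⟨hr, ⟨-, hadj⟩, hlt⟩
              exact ⟨fun w hw => hr w (List.mem_cons_of_mem _ hw), hadj, hlt⟩

-- the chain condition of D_ is exactly AdjOK
lemma adjok_iff_chain (numbers : List Int) :
    AdjOK none numbers ↔ numbers.IsChain (fun a b => b = a → b = 0) := by
  rcases numbers with _ | ⟨v, rest⟩
  · simp [AdjOK]
  · suffices h : ∀ (rest : List Int) (v : Int), AdjOK (some v) rest ↔
        (v :: rest).IsChain (fun a b => b = a → b = 0) by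
      simp only [AdjOK]
      rw [h rest v]
      tauto
    intro rest
    induction rest with
    | nil => simp [AdjOK]
    | cons w t ih =>
      intro v
      rw [List.isChain_cons_cons]
      simp only [AdjOK, ih w]
      constructor
      · rintro ⟨hne, hch⟩
        refine ⟨?_, hch⟩
        intro he
        by_contra hw
        exact hne hw (by rw [he])
      · rintro ⟨hvw, hch⟩
        refine ⟨?_, hch⟩
        intro hw hs
        have : v = w := by injection hs
        exact hw (hvw this.symm)

-- D_ unfolded into the pieces the characterizations use
lemma D_iff (numbers : List Int) :
    D_is_continue numbers ↔
      numbers.length = 5 ∧ RangeOK numbers ∧ AdjOK none numbers ∧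
      ¬ (numbers.filter (fun v => v ≠ 0)).Nodup ∧
      (∀ a ∈ numbers.filter (fun v => v ≠ 0), ∀ b ∈ numbers.filter (fun v => v ≠ 0), a - b ≤ 4) := by
  unfold D_is_continue RangeOK
  rw [adjok_iff_chain]
  constructor
  · rintro ⟨h5, hN, hch, hq⟩
    refine ⟨h5, fun v hv => ⟨(hq v hv v hv).1, (hq v hv v hv).2.1⟩, hch, hN, ?_⟩
    intro a ha b hb
    rcases List.mem_filter.mp ha with ⟨ha', ha0⟩
    rcases List.mem_filter.mp hb with ⟨hb', hb0⟩
    simp only [decide_eq_true_eq] at ha0 hb0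
    rcases (hq a ha' b hb').2.2 with h | h | h
    · exact absurd h ha0
    · exact absurd h hb0
    · exact h
  · rintro ⟨h5, hr, hch, hN, hsp⟩
    refine ⟨h5, hN, hch, ?_⟩
    intro a ha b hb
    refine ⟨(hr a ha).1, (hr a ha).2, ?_⟩
    by_cases ha0 : a = 0
    · exact Or.inl ha0
    by_cases hb0 : b = 0
    · exact Or.inr (Or.inl hb0)
    exact Or.inr (Or.inr (hsp a (List.mem_filter.mpr ⟨ha, by simp [ha0]⟩)
      b (List.mem_filter.mpr ⟨hb, by simp [hb0]⟩)))

-- a duplicate-free nonzero list forces A's adjacent check to pass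
lemma adjok_of_nodup (l : List Int) (prev : Option Int)
    (h : ((prev.toList ++ l).filter (fun v => v ≠ 0)).Nodup) : AdjOK prev l := by
  induction l generalizing prev with
  | nil => exact trivial
  | cons w t ih =>
    refine ⟨?_, ih (some w) ?_⟩
    · rintro hw rfl
      have heq : ((some w).toList ++ w :: t).filter (fun v => v ≠ 0) =
          w :: w :: t.filter (fun v => v ≠ 0) := by
        simp [hw]
      rw [heq] at h
      exact (List.nodup_cons.mp h).1 (List.mem_cons_self ..)
    · have hsub : ((w :: t).filter (fun v => v ≠ 0)).Sublist
          ((prev.toList ++ w :: t).filter (fun v => v ≠ 0)) :=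
        (List.sublist_append_right _ _).filter _
      exact hsub.nodup h

-- B's tail (max/min of the nonzero-card set) is the pairwise span condition
lemma b_tail_iff (nz : List Int) :
    ((match PySem.List.max? (PySem.Set.ofList nz) (fun x => x),
           PySem.List.min? (PySem.Set.ofList nz) (fun x => x) with
      | some mx, some mn => decide (mx - mn ≤ 4)
      | _, _ => true) = true) ↔
    (∀ a ∈ nz, ∀ b ∈ nz, a - b ≤ 4) := by
  rcases hnz : nz with _ | ⟨x, t⟩
  · simp [PySem.Set.ofList, PySem.Set.empty, PySem.List.max?, PySem.List.min?]
  · have hxmem : x ∈ PySem.Set.ofList (x :: t) := (PySem.Set.mem_ofList _ _).mpr (by simp)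
    have hne : PySem.Set.ofList (x :: t) ≠ [] := by
      intro h; rw [h] at hxmem; cases hxmem
    obtain ⟨mx, hmx⟩ : ∃ mx, PySem.List.max? (PySem.Set.ofList (x :: t)) (fun x => x) = some mx := by
      cases hm : PySem.List.max? (PySem.Set.ofList (x :: t)) (fun x => x)
      · exact absurd ((PySem.List.max?_eq_none_iff _ _).mp hm) hne
      · exact ⟨_, rfl⟩
    obtain ⟨mn, hmn⟩ : ∃ mn, PySem.List.min? (PySem.Set.ofList (x :: t)) (fun x => x) = some mn := by
      cases hm : PySem.List.min? (PySem.Set.ofList (x :: t)) (fun x => x)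
      · exact absurd ((PySem.List.min?_eq_none_iff _ _).mp hm) hne
      · exact ⟨_, rfl⟩
    rw [hmx, hmn]
    simp only [decide_eq_true_eq]
    constructor
    · intro hle a ha b hb
      have h1 := PySem.List.max?_isMax hmx a ((PySem.Set.mem_ofList _ _).mpr ha)
      have h2 := PySem.List.min?_isMin hmn b ((PySem.Set.mem_ofList _ _).mpr hb)
      simp only at h1 h2
      omega
    · intro hall
      have h1 := (PySem.Set.mem_ofList _ _).mp (PySem.List.max?_mem hmx)
      have h2 := (PySem.Set.mem_ofList _ _).mp (PySem.List.min?_mem hmn)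
      exact hall mx h1 mn h2

-- |set(l)| = |l.dedup|
lemma ofList_perm_dedup (l : List Int) : (PySem.Set.ofList l : List Int).Perm l.dedup := by
  rw [List.perm_ext_iff_of_nodup (PySem.Set.nodup_ofList l) l.nodup_dedup]
  intro a
  rw [PySem.Set.mem_ofList, List.mem_dedup]

lemma ofList_length_le (l : List Int) :
    (PySem.Set.ofList l : List Int).length ≤ l.length := by
  rw [(ofList_perm_dedup l).length_eq]
  exact (List.dedup_sublist l).length_le

-- |set(l)| = |l| exactly when l has no duplicates
lemma ofList_length_iff_nodup (l : List Int) :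
    (PySem.Set.ofList l : List Int).length = l.length ↔ l.Nodup := by
  rw [(ofList_perm_dedup l).length_eq]
  constructor
  · intro h
    exact List.dedup_eq_self.mp ((List.dedup_sublist l).eq_of_length h)
  · intro h
    rw [List.dedup_eq_self.mpr h]

-- nonzero cards plus jokers make up the whole hand
lemma filter_count_len (l : List Int) :
    (l.filter (fun v => v ≠ 0)).length + l.count 0 = l.length := by
  induction l with
  | nil => simp
  | cons x t ih =>
    by_cases h : x = 0 <;> simp [h] at ih ⊢ <;> omega

-- characterization of B
lemma altB_iff (numbers : List Int) :
    is_continue_alt numbers = true ↔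
      numbers.length = 5 ∧ RangeOK numbers ∧
      (numbers.filter (fun v => v ≠ 0)).Nodup ∧
      (∀ a ∈ numbers.filter (fun v => v ≠ 0), ∀ b ∈ numbers.filter (fun v => v ≠ 0), a - b ≤ 4) := by
  unfold is_continue_alt
  by_cases h5 : numbers.length = 5
  · rw [if_neg (by simp [h5])]
    by_cases hr : RangeOK numbers
    · rw [if_neg (by
        intro hc
        simp only [List.any_eq_true, decide_eq_true_eq] at hc
        obtain ⟨v, hv, hvr⟩ := hc
        have := hr v hv; omega)]
      set nz := numbers.filter (fun v => v ≠ 0) with hnz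
      have hcnt : nz.length + numbers.count 0 = numbers.length := by
        rw [hnz]; exact filter_count_len numbers
      by_cases hN : nz.Nodup
      · rw [if_neg (by
          simp only [PySem.Set.len, PySem.List.count]
          have := (ofList_length_iff_nodup nz).mpr hN
          omega)]
        rw [b_tail_iff nz]
        tauto
      · rw [if_pos (by
          simp only [PySem.Set.len, PySem.List.count]
          have hle := ofList_length_le nz
          have hne : (PySem.Set.ofList nz : List Int).length ≠ nz.length :=
            fun h => hN ((ofList_length_iff_nodup nz).mp h)
          omega)]
        simp [hN]
    · rw [if_pos (by
        simp only [RangeOK, not_forall] at hr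
        obtain ⟨v, hv, hvr⟩ := hr
        simp only [List.any_eq_true, decide_eq_true_eq]
        exact ⟨v, hv, by omega⟩)]
      simp [hr]
  · simp [h5]

-- the sentinel-seeded running span equals the pairwise span condition, given the range check
lemma span_iff (nz : List Int) (hr : ∀ v ∈ nz, 0 ≤ v ∧ v ≤ 13) :
    (nz.foldl max (-1) - nz.foldl min 14 < 5) ↔
      (∀ a ∈ nz, ∀ b ∈ nz, a - b ≤ 4) := by
  rcases nz with _ | ⟨x, t⟩
  · simp
  · have hx := hr x (List.mem_cons_self ..)
    have hmaxmem := foldl_max_mem ((x :: t)) (-1)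
    have hminmem := foldl_min_mem ((x :: t)) 14
    have hmaxub := PySem.List.le_foldl_max (x :: t) (-1) |>.2
    have hminlb := (foldl_min_le_forall (x :: t) 14).2
    constructor
    · intro h a ha b hb
      have h1 := hmaxub a (by simpa using ha)
      have h2 := hminlb b (by simpa using hb)
      simp only [List.foldl_cons] at h h1 h2 ⊢
      omega
    · intro hall
      have hmx : (x :: t).foldl max (-1) ∈ x :: t := by
        rcases List.mem_cons.mp hmaxmem with he | he
        · exfalso
          have := hmaxub x (List.mem_cons_self ..)
          rw [he] at this; omega
        · exact he
      have hmn : (x :: t).foldl min 14 ∈ x :: t := by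
        rcases List.mem_cons.mp hminmem with he | he
        · exfalso
          have := hminlb x (List.mem_cons_self ..)
          rw [he] at this; omega
        · exact he
      have := hall _ hmx _ hmn
      omega

-- characterization of A
lemma a_iff (numbers : List Int) :
    is_continue numbers = true ↔
      numbers.length = 5 ∧ RangeOK numbers ∧ AdjOK none numbers ∧
      (∀ a ∈ numbers.filter (fun v => v ≠ 0), ∀ b ∈ numbers.filter (fun v => v ≠ 0), a - b ≤ 4) := by
  unfold is_continue
  by_cases h5 : numbers.length = 5
  · have hne : numbers ≠ [] := by intro h; rw [h] at h5; simp at h5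
    rw [if_neg (by simp [hne, h5])]
    rw [loopA_iff numbers none 14 (-1) (by omega)]
    constructor
    · rintro ⟨hr, hadj, hsp⟩
      refine ⟨h5, hr, hadj, ?_⟩
      rw [← span_iff _ (fun v hv => hr v (List.mem_of_mem_filter hv))]
      exact hsp
    · rintro ⟨-, hr, hadj, hsp⟩
      refine ⟨hr, hadj, ?_⟩
      rw [span_iff _ (fun v hv => hr v (List.mem_of_mem_filter hv))]
      exact hsp
  · rw [if_pos (by simp [h5])]
    simp [h5]

lemma bool_ext {a b : Bool} (h : a = true ↔ b = true) : a = b := by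
  cases a <;> cases b <;> simp_all

lemma main_eq (numbers : List Int) (hD : ¬ D_is_continue numbers) :
    is_continue numbers = is_continue_alt numbers := by
  apply bool_ext
  rw [a_iff, altB_iff]
  constructor
  · rintro ⟨h5, hr, hadj, hsp⟩
    refine ⟨h5, hr, ?_, hsp⟩
    by_contra hN
    exact hD ((D_iff numbers).mpr ⟨h5, hr, hadj, hN, hsp⟩)
  · rintro ⟨h5, hr, hN, hsp⟩
    exact ⟨h5, hr, adjok_of_nodup numbers none (by simpa using hN), hsp⟩

-- ===== VERDICT (by name: the statement is the Claim_ definition above) =====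
theorem is_continue_spec : Claim_unchanged_is_continue := by
  intro numbers _ hD
  exact main_eq numbers hD

theorem is_continue_changed : Claim_changed_is_continue := by
  unfold Claim_changed_is_continue; decide

theorem is_continue_tight : Claim_exact_is_continue := by
  intro numbers _ hD
  obtain ⟨h5, hr, hadj, hN, hsp⟩ := (D_iff numbers).mp hD
  have hA : is_continue numbers = true :=
    (a_iff numbers).mpr ⟨h5, hr, hadj, hsp⟩
  have hB : is_continue_alt numbers ≠ true := fun h =>
    hN ((altB_iff numbers).mp h).2.2.1
  rw [hA]
  exact fun h => hB h.symm
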